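-- pv_equiv track=rewrite | github.com/patilyashshree2/Minesweeper-and-Maze-Runner-played-by-AI | Assignment_2/520_Assignment_2.py | neighbors_count
-- ===== SOURCE A (Python) =====
-- rows = 5
--
-- cols = 5
--
-- def neighbors_count(i,j):
--     count = 0
--     a = max(j-1,0)
--     b = min(j+2,cols)
--     c = max(i-1,0)
--     d = min(i+2,rows)
--
--     row_range = range(c,d)
--     col_range = range(a,b)
--
--     for x in row_range:
--         for y in col_range:
--             if (x==i and y==j):
--                 continue
--             count = count+1
--     return count
-- ===== SOURCE B (Python) =====
-- rows = 5
--
-- cols = 5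
--
-- def neighbors_count(i, j):
--     a = max(j - 1, 0)
--     b = min(j + 2, cols)
--     c = max(i - 1, 0)
--     d = min(i + 2, rows)
--     total = max(0, b - a) * max(0, d - c)
--     if c <= i < d and a <= j < b:
--         total -= 1
--     return total
-- ===== Notes on version B (the rewrite author's own statement) =====
-- stated objective: simpler
-- what changed: Replaces the double loop over the clipped row/column ranges with a closed-form area computation (width*height, minus 1 when the center cell lies inside the clipped rectangle).
import Mathlib
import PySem

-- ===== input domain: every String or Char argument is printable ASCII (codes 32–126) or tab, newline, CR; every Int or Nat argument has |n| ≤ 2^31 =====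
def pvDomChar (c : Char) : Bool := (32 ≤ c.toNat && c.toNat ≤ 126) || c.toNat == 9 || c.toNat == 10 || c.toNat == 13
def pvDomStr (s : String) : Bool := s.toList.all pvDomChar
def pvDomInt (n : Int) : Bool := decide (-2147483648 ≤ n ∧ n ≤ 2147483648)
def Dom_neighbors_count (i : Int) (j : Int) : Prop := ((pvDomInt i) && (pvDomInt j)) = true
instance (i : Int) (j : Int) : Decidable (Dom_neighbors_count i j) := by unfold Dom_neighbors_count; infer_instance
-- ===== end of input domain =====

-- B replaces A's double loop with a closed-form area count (simpler; same values).

-- ===== PORT A =====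
def pvRows : Int := 5
def pvCols : Int := 5

def neighbors_count (i : Int) (j : Int) : Int :=
  let a := max (j - 1) 0
  let b := min (j + 2) pvCols
  let c := max (i - 1) 0
  let d := min (i + 2) pvRows
  (PySem.List.pyRange c d 1).foldl (fun count x =>
    (PySem.List.pyRange a b 1).foldl (fun count y =>
      if x = i ∧ y = j then count else count + 1) count) 0

-- ===== PORT B =====
def neighbors_count_alt (i : Int) (j : Int) : Int :=
  let a := max (j - 1) 0
  let b := min (j + 2) pvCols
  let c := max (i - 1) 0
  let d := min (i + 2) pvRows
  let total := max 0 (b - a) * max 0 (d - c)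
  if c ≤ i ∧ i < d ∧ a ≤ j ∧ j < b then total - 1 else total

-- ===== PRECONDITION & SPEC =====
def Spec_neighbors_count (i : Int) (j : Int) (out : Int) : Prop := out = neighbors_count_alt i j
instance (i : Int) (j : Int) (out : Int) : Decidable (Spec_neighbors_count i j out) := by unfold Spec_neighbors_count; infer_instance

-- ===== CLAIM (what is proved, stated in full; the proofs are below) =====
def Claim_equal_neighbors_count : Prop := ∀ (i : Int) (j : Int), Dom_neighbors_count i j → Spec_neighbors_count i j (neighbors_count i j)

-- ===== LEMMAS AND PROOFS =====

theorem pv_foldl_const {α : Type} (l : List α) (z : Int) :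
    l.foldl (fun c (_ : α) => c) z = z := by
  induction l generalizing z with
  | nil => rfl
  | cons h t ih => exact ih z

-- Both sides are 0 when the row range is empty or the column range is empty.
theorem pv_A_zero_row (i j : Int) (h : min (i + 2) pvRows ≤ max (i - 1) 0) :
    neighbors_count i j = 0 := by
  show (PySem.List.pyRange (max (i - 1) 0) (min (i + 2) pvRows) 1).foldl _ 0 = 0
  rw [PySem.List.pyRange_one_eq_nil h]
  rfl

theorem pv_A_zero_col (i j : Int) (h : min (j + 2) pvCols ≤ max (j - 1) 0) :
    neighbors_count i j = 0 := by
  show (PySem.List.pyRange (max (i - 1) 0) (min (i + 2) pvRows) 1).foldl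
      (fun count x => (PySem.List.pyRange (max (j - 1) 0) (min (j + 2) pvCols) 1).foldl
        (fun count y => if x = i ∧ y = j then count else count + 1) count) 0 = 0
  rw [PySem.List.pyRange_one_eq_nil h]
  simp only [List.foldl_nil]
  exact pv_foldl_const _ 0

theorem pv_B_zero (i j : Int)
    (h : min (i + 2) pvRows ≤ max (i - 1) 0 ∨ min (j + 2) pvCols ≤ max (j - 1) 0) :
    neighbors_count_alt i j = 0 := by
  show (if max (i - 1) 0 ≤ i ∧ i < min (i + 2) pvRows ∧ max (j - 1) 0 ≤ j ∧ j < min (j + 2) pvCols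
      then max 0 (min (j + 2) pvCols - max (j - 1) 0) * max 0 (min (i + 2) pvRows - max (i - 1) 0) - 1
      else max 0 (min (j + 2) pvCols - max (j - 1) 0) * max 0 (min (i + 2) pvRows - max (i - 1) 0)) = 0
  unfold pvRows pvCols at *
  rcases h with h | h
  · have h0 : max 0 (min (i + 2) 5 - max (i - 1) 0) = 0 := by omega
    split_ifs with hc
    · exact absurd hc (by omega)
    · rw [h0, mul_zero]
  · have h0 : max 0 (min (j + 2) 5 - max (j - 1) 0) = 0 := by omega
    split_ifs with hc
    · exact absurd hc (by omega)
    · rw [h0, zero_mul]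

-- ===== VERDICT (by name: the statement is the Claim_ definition above) =====
theorem neighbors_count_spec : Claim_equal_neighbors_count := by
  intro i j _
  unfold Spec_neighbors_count
  by_cases hi : -1 ≤ i ∧ i ≤ 5
  · by_cases hj : -1 ≤ j ∧ j ≤ 5
    · obtain ⟨hi1, hi2⟩ := hi
      obtain ⟨hj1, hj2⟩ := hj
      interval_cases i <;> interval_cases j <;> decide
    · have h : min (j + 2) pvCols ≤ max (j - 1) 0 := by unfold pvCols; omega
      rw [pv_A_zero_col i j h, pv_B_zero i j (Or.inr h)]
  · have h : min (i + 2) pvRows ≤ max (i - 1) 0 := by unfold pvRows; omega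
    rw [pv_A_zero_row i j h, pv_B_zero i j (Or.inl h)]
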